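-- pv_equiv track=rewrite | github.com/malabz/Jtmsa | PSA_Suffixtree.py | _trace_back
-- ===== SOURCE A (Python) =====
-- def _trace_back(results:list, p:list) -> list:
--     i = p.index(max(p))
--     track = [i]
--     while i > 0:
--         j = i - 1
--         if p[i] == results[i][1]: break
--         while j >= 0:
--             if results[i][2] >= (results[j][2]+results[j][1]) and p[i] == p[j] + results[i][1]:
--                 track.append(j)
--                 i = j
--                 break
--             j -= 1
--     return track[::-1]
-- ===== SOURCE B (Python) =====
-- def _trace_back(results: list, p: list) -> list:
--     # Index positions of p by value once, so each chain step is a bucket walk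
--     # instead of a linear scan over all smaller indices.
--     buckets = {}
--     for idx, v in enumerate(p):
--         buckets.setdefault(v, []).append(idx)  # each bucket is ascending
--     i = p.index(max(p))
--     track = [i]
--     while i > 0:
--         if p[i] == results[i][1]:
--             break
--         target = p[i] - results[i][1]
--         for j in reversed(buckets.get(target, [])):
--             if j < i and results[i][2] >= results[j][2] + results[j][1]:
--                 track.append(j)
--                 i = j
--                 break
--         # if no candidate qualifies the loop re-enters unchanged (as in A)
--     return track[::-1]
-- ===== Notes on version B (the rewrite author's own statement) =====
-- stated objective: alternative
-- what changed: The inner linear scan over all smaller indices is replaced by a dict built once that groups positions by their p-value; each chain step looks up the single bucket for the required predecessor value p[i]-results[i][1] and walks it in descending order, taking the first position j<i that satisfies the span condition.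
import Mathlib
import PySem

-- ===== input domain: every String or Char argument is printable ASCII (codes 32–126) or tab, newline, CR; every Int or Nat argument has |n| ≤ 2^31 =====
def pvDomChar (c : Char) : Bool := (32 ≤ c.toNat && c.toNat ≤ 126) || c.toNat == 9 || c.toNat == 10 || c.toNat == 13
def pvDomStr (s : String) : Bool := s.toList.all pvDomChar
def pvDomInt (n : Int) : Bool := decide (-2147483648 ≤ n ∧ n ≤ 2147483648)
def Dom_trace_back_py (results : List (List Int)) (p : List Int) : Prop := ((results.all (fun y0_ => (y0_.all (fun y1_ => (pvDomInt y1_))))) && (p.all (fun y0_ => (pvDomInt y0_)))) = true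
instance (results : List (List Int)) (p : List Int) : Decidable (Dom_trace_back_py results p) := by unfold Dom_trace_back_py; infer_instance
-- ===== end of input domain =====

-- B replaces A's inner linear scan over all smaller indices by a dict grouping
-- positions by p-value, walked in descending order (alternative decomposition,
-- same results).


-- shared index helpers (defaults are irrelevant under Pre_, which keeps all reads in range)
def getp (p : List Int) (i : Int) : Int := PySem.List.pyGetD p i 0
def getr (results : List (List Int)) (i k : Int) : Int :=
  PySem.List.pyGetD (PySem.List.pyGetD results i []) k 0
-- the start index i0 = p.index(max(p)) (0 for empty p, unreachable under Pre_)
def startIdx (p : List Int) : Nat :=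
  (PySem.List.index? p ((PySem.List.max? p (fun x => x)).getD 0)).getD 0

-- ===== PORT A =====
-- inner 'while j >= 0' scan; fuel m means current j = m - 1
def condA (results : List (List Int)) (p : List Int) (i j : Int) : Bool :=
  decide (getr results i 2 ≥ getr results j 2 + getr results j 1) &&
  decide (getp p i = getp p j + getr results i 1)

def innerA (results : List (List Int)) (p : List Int) (i : Int) : Nat → Option Int
  | 0 => none
  | m + 1 => if condA results p i (m : Int) then some (m : Int) else innerA results p i m

-- outer 'while i > 0' loop; fuel makes the port total (Python A loops forever when no j
-- matches at a reached state; Pre_ excludes exactly that, and under Pre_ the chain is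
-- strictly decreasing from startIdx p < p.length, so fuel p.length never runs out)
def outerA (results : List (List Int)) (p : List Int) :
    Nat → Int → List Int → List Int
  | 0, _, track => track
  | n + 1, i, track =>
    if i > 0 then
      if getp p i = getr results i 1 then track
      else
        match innerA results p i i.toNat with
        | some j => outerA results p n j (track ++ [j])
        | none => outerA results p n i track
    else track

def trace_back_py (results : List (List Int)) (p : List Int) : List Int :=
  let i : Int := (startIdx p : Int)
  (outerA results p p.length i [i]).reverse

-- ===== PORT B =====
-- buckets: value -> ascending list of its positions in p (setdefault/append loop)
def bstep (d : PySem.Dict Int (List Int)) (e : Int × Int) : PySem.Dict Int (List Int) :=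
  d.insert e.2 ((d.getD e.2 []) ++ [e.1])

def bucketsOf (p : List Int) : PySem.Dict Int (List Int) :=
  (PySem.List.enumerate p).foldl bstep PySem.Dict.empty

def condB (results : List (List Int)) (i j : Int) : Bool :=
  decide (j < i) && decide (getr results i 2 ≥ getr results j 2 + getr results j 1)

-- 'for j in reversed(bucket)' walk
def innerB (results : List (List Int)) (i : Int) : List Int → Option Int
  | [] => none
  | j :: rest => if condB results i j then some j else innerB results i rest

def outerB (results : List (List Int)) (p : List Int) (bk : PySem.Dict Int (List Int)) :
    Nat → Int → List Int → List Int
  | 0, _, track => track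
  | n + 1, i, track =>
    if i > 0 then
      if getp p i = getr results i 1 then track
      else
        match innerB results i ((bk.getD (getp p i - getr results i 1) []).reverse) with
        | some j => outerB results p bk n j (track ++ [j])
        | none => outerB results p bk n i track
    else track

def trace_back_py_alt (results : List (List Int)) (p : List Int) : List Int :=
  let bk := bucketsOf p
  let i : Int := (startIdx p : Int)
  (outerB results p bk p.length i [i]).reverse

-- ===== PRECONDITION & SPEC =====
-- length of row k of results ([] when k is out of range, as Python's IndexError case)
def rowLen (results : List (List Int)) (k : Nat) : Nat :=
  (PySem.List.pyGetD results (k : Nat) ([] : List Int)).length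
-- first j scanned by A's inner loop (j = k-1 down to 0) at which the scan stops:
-- either row j is too short (Python raises there) or the match condition holds
def cand (results : List (List Int)) (p : List Int) (k : Nat) : Option Nat :=
  (List.range k).reverse.find?
    (fun j => decide (rowLen results j < 3) || condA results p (k : Int) (j : Int))

-- okA b k = true iff Python A's outer loop, entered at state k, returns normally
-- (false = it raises IndexError on a short/missing row, or scans past j = 0 with no
-- match and loops forever); checks mirror A's exact read order.  The chain k > j > …
-- is strictly decreasing, so the structural bound b = k dominates it and the
-- b = 0, k > 0 branch is never reached.
def okA (results : List (List Int)) (p : List Int) : Nat → Nat → Bool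
  | _, 0 => true
  | 0, _ + 1 => false
  | b + 1, k + 1 =>
    if rowLen results (k + 1) < 2 then false          -- results[i][1] raises
    else if getp p ((k + 1 : Nat) : Int) = getr results ((k + 1 : Nat) : Int) 1 then true
    else if rowLen results (k + 1) < 3 then false     -- results[i][2] raises
    else
      match cand results p (k + 1) with
      | none => false                                  -- no match: A loops forever
      | some j => if rowLen results j < 3 then false   -- results[j][2] raises
                  else okA results p b j

-- Pre_ holds exactly when Python A returns: p nonempty (max/index of [] raises) and the
-- greedy chain from the start index neither hits a too-short row (IndexError) nor a
-- state with no matching predecessor (infinite loop).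
def Pre_trace_back_py (results : List (List Int)) (p : List Int) : Prop :=
  p ≠ [] ∧ okA results p (startIdx p) (startIdx p) = true
instance (results : List (List Int)) (p : List Int) : Decidable (Pre_trace_back_py results p) := by
  unfold Pre_trace_back_py; infer_instance

def pvWitness_trace_back_py : List (List Int) × List Int := ([[0, 0, 0], [0, 1, 0]], [0, 1])

def Spec_trace_back_py (results : List (List Int)) (p : List Int) (out : List Int) : Prop := out = trace_back_py_alt results p
instance (results : List (List Int)) (p : List Int) (out : List Int) : Decidable (Spec_trace_back_py results p out) := by unfold Spec_trace_back_py; infer_instance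

-- ===== CLAIM (what is proved, stated in full; the proofs are below) =====
def Claim_equal_trace_back_py : Prop := ∀ (results : List (List Int)) (p : List Int), Dom_trace_back_py results p → Pre_trace_back_py results p → Spec_trace_back_py results p (trace_back_py results p)

-- ===== LEMMAS AND PROOFS =====

-- find? is congruent for predicates agreeing on members
theorem pv_find?_congr_mem {α : Type} {P Q : α → Bool} :
    ∀ (l : List α), (∀ a ∈ l, P a = Q a) → l.find? P = l.find? Q
  | [], _ => rfl
  | a :: t, h => by
    have ha := h a (by simp)
    simp only [List.find?_cons, ha]
    cases Q a with
    | true => rfl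
    | false => exact pv_find?_congr_mem t (fun x hx => h x (by simp [hx]))

-- find? over a filter folds the filter into the predicate
theorem pv_find?_filter {α : Type} {P Q : α → Bool} :
    ∀ (l : List α), (l.filter Q).find? P = l.find? (fun a => Q a && P a)
  | [] => rfl
  | a :: t => by
    cases hq : Q a with
    | false => simp [hq, pv_find?_filter t]
    | true =>
      simp only [List.filter_cons, List.find?_cons, hq, Bool.true_and, if_true]
      cases hP : P a with
      | true => simp
      | false => simp [pv_find?_filter t]

-- the bucket-building fold, characterised per key
theorem pv_foldB (l : List (Int × Int)) :
    ∀ (d : PySem.Dict Int (List Int)) (v : Int),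
      ((l.foldl bstep d).getD v []) =
        d.getD v [] ++ (l.filter (fun e => e.2 == v)).map (fun e => e.1) := by
  induction l with
  | nil => intro d v; simp
  | cons a t ih =>
    intro d v
    simp only [List.foldl_cons, List.filter_cons, ih]
    by_cases hv : a.2 = v
    · simp [bstep, hv]
    · simp [bstep, PySem.Dict.getD_insert, hv, Ne.symm hv]

theorem pv_bucket_eq (p : List Int) (v : Int) :
    (bucketsOf p).getD v [] =
      (PySem.List.pyRange 0 (p.length : Int)).filter (fun j => getp p j == v) := by
  unfold bucketsOf
  rw [pv_foldB, PySem.List.enumerate_eq_map_pyRange p 0, List.filter_map, List.map_map]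
  have h1 : ((fun (e : Int × Int) => e.2 == v) ∘ fun j => (j, PySem.List.pyGetD p j 0)) =
      (fun j => getp p j == v) := rfl
  have h2 : ((fun (e : Int × Int) => e.1) ∘ fun j => (j, PySem.List.pyGetD p j 0)) = id := rfl
  rw [h1, h2, List.map_id, PySem.Dict.getD_empty, List.nil_append]
  have h3 : PySem.List.len p = (p.length : Int) := by simp [PySem.List.len]
  rw [h3]

-- innerA is find? over the countdown range i-1, i-2, …, 0
theorem pv_innerA_eq (results : List (List Int)) (p : List Int) (i : Int) :
    ∀ m : Nat, innerA results p i m =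
      (PySem.List.pyRange ((m : Int) - 1) (-1) (-1)).find? (condA results p i)
  | 0 => by
    rw [show ((0 : Nat) : Int) - 1 = -1 by norm_num, PySem.List.pyRange_neg_one_eq_nil le_rfl]
    rfl
  | m + 1 => by
    rw [show ((m + 1 : Nat) : Int) - 1 = (m : Int) by push_cast; ring]
    rw [PySem.List.pyRange_neg_one_cons (by omega : (-1 : Int) < (m : Int))]
    simp only [innerA, List.find?_cons]
    cases condA results p i (m : Int) with
    | true => rfl
    | false => rw [pv_innerA_eq results p i m]; norm_num

theorem pv_innerB_eq (results : List (List Int)) (i : Int) :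
    ∀ l : List Int, innerB results i l = l.find? (condB results i)
  | [] => rfl
  | j :: rest => by
    simp only [innerB, List.find?_cons]
    cases condB results i j with
    | true => rfl
    | false => exact pv_innerB_eq results i rest

-- the key step: the bucket walk finds exactly what A's scan finds
theorem pv_inner_eq (results : List (List Int)) (p : List Int) (i : Int)
    (h0 : 0 ≤ i) (hn : i ≤ (p.length : Int)) :
    innerA results p i i.toNat =
      innerB results i (((bucketsOf p).getD (getp p i - getr results i 1) []).reverse) := by
  set v : Int := getp p i - getr results i 1 with hv
  have hrev : ∀ a b : Int, (PySem.List.pyRange a b).reverse = PySem.List.pyRange (b - 1) (a - 1) (-1) := by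
    intro a b
    rw [PySem.List.pyRange_neg_one_eq_reverse,
      show (a - 1 + 1) = a by ring, show (b - 1 + 1) = b by ring]
  rw [pv_innerA_eq, pv_innerB_eq, pv_bucket_eq,
    show ((i.toNat : Int) - 1) = i - 1 by omega,
    ← List.filter_reverse, hrev 0 (p.length : Int), pv_find?_filter]
  have hsplit : PySem.List.pyRange ((p.length : Int) - 1) (0 - 1) (-1) =
      PySem.List.pyRange ((p.length : Int) - 1) (i - 1) (-1) ++
        PySem.List.pyRange (i - 1) (0 - 1) (-1) := by
    rw [← hrev 0 (p.length : Int), ← hrev i (p.length : Int), ← hrev 0 i,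
      ← List.reverse_append, ← PySem.List.pyRange_one_append 0 i (p.length : Int) h0 hn]
  rw [hsplit, List.find?_append]
  have h1 : ((PySem.List.pyRange ((p.length : Int) - 1) (i - 1) (-1)).find?
      fun a => (getp p a == v) && condB results i a) = none := by
    rw [List.find?_eq_none]
    intro x hx
    rw [PySem.List.mem_pyRange_neg_one] at hx
    simp [condB, show ¬ x < i by omega]
  rw [h1, Option.none_or]
  apply pv_find?_congr_mem
  intro a ha
  rw [PySem.List.mem_pyRange_neg_one] at ha
  have halt : decide (a < i) = true := by simp; omega
  simp only [condA, condB, hv, halt, Bool.true_and]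
  rw [Bool.and_comm]
  congr 1
  rw [show (getp p a == getp p i - getr results i 1) =
      decide (getp p a = getp p i - getr results i 1) from rfl, decide_eq_decide]
  omega

-- membership bound for what the bucket walk returns
theorem pv_innerB_bounds (results : List (List Int)) (p : List Int) (i v j : Int)
    (h : innerB results i (((bucketsOf p).getD v []).reverse) = some j) :
    0 ≤ j ∧ j ≤ (p.length : Int) := by
  rw [pv_innerB_eq] at h
  have hm := List.mem_of_find?_eq_some h
  rw [List.mem_reverse, pv_bucket_eq, List.mem_filter, PySem.List.mem_pyRange_one] at hm
  omega

-- the two outer loops agree step by step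
theorem pv_outer_eq (results : List (List Int)) (p : List Int) :
    ∀ (n : Nat) (i : Int) (track : List Int), 0 ≤ i → i ≤ (p.length : Int) →
      outerA results p n i track = outerB results p (bucketsOf p) n i track := by
  intro n
  induction n with
  | zero => intro i track _ _; rfl
  | succ m ih =>
    intro i track h0 hn
    simp only [outerA, outerB]
    split
    · split
      · rfl
      · rw [pv_inner_eq results p i h0 hn]
        cases hfind : innerB results i
            (((bucketsOf p).getD (getp p i - getr results i 1) []).reverse) with
        | none => exact ih i track h0 hn
        | some j =>
          obtain ⟨hj0, hjn⟩ := pv_innerB_bounds results p i _ j hfind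
          exact ih j (track ++ [j]) hj0 hjn
    · rfl

theorem pv_startIdx_le (p : List Int) : startIdx p ≤ p.length := by
  unfold startIdx
  cases h : PySem.List.index? p ((PySem.List.max? p fun x => x).getD 0) with
  | none => simp
  | some k =>
    obtain ⟨hk, -, -⟩ := PySem.List.getElem_of_index?_eq_some h
    simp [Option.getD]; omega

-- ===== VERDICT (by name: the statement is the Claim_ definition above) =====
theorem trace_back_py_spec : Claim_equal_trace_back_py := by
  intro results p _ _
  unfold Spec_trace_back_py trace_back_py trace_back_py_alt
  have h := pv_outer_eq results p p.length ((startIdx p : Int)) [(startIdx p : Int)]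
    (by positivity) (by exact_mod_cast pv_startIdx_le p)
  simp only [h]
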